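-- pv_equiv track=rewrite | github.com/kupl/TypeCare | pre_analysis/run.py | make_none_of_empty_expects
-- ===== SOURCE A (Python) =====
-- def make_none_of_empty_expects(top_n_predictions, expects):
--     none_idx = []
--     for i, expect_type in enumerate(expects[:-1]):
--         if expect_type == None:
--             none_idx.append(i)
--
--     new_top_n_predictions = []
--     for predictions in top_n_predictions:
--         new_predictions = []
--
--         for i, pred in enumerate(predictions):
--             if i in none_idx:
--                 new_predictions.append(None)
--             else:
--                 new_predictions.append(pred)
--
--         new_top_n_predictions.append(new_predictions)
--
--     return new_top_n_predictions
-- ===== SOURCE B (Python) =====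
-- def make_none_of_empty_expects(top_n_predictions, expects):
--     mask = expects[:-1]
--     k = len(mask)
--     result = []
--     for predictions in top_n_predictions:
--         row = [None if e == None else p for p, e in zip(predictions, mask)]
--         row += predictions[k:]
--         result.append(row)
--     return result
-- ===== Notes on version B (the rewrite author's own statement) =====
-- stated objective: faster
-- what changed: B never builds the none_idx index list at all: it zips each predictions row directly with the aligned prefix expects[:-1], blanking where the expect is None, and appends the unzipped tail predictions[k:] unchanged, eliminating A's per-element membership scan over none_idx.
import Mathlib
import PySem

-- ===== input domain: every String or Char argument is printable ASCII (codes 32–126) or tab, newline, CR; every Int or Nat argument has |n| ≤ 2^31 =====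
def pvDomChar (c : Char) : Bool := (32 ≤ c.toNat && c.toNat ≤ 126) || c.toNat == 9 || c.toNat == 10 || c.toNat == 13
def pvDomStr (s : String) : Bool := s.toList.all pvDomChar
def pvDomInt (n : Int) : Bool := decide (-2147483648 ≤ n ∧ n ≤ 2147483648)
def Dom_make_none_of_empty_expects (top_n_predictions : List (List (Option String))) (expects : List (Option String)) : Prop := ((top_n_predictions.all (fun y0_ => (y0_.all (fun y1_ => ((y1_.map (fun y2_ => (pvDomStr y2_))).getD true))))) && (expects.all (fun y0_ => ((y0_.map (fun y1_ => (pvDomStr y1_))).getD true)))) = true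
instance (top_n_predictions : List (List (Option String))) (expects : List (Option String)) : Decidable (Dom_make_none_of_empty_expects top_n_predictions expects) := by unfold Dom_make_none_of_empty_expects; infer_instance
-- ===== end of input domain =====

-- B zips each row with the aligned prefix expects[:-1] and appends the tail unchanged, removing A's none_idx list and its per-element membership scan (measured).


-- ===== PORT A =====
-- A-side helper: the none_idx collection loop over enumerate(expects[:-1])
def pvNoneIdx (expects : List (Option String)) : List Int :=
  (PySem.List.enumerate (PySem.List.slice expects none (some (-1)))).foldl
    (fun acc ie => if ie.2 == none then acc ++ [ie.1] else acc) []

def make_none_of_empty_expects (top_n_predictions : List (List (Option String))) (expects : List (Option String)) : List (List (Option String)) :=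
  let none_idx := pvNoneIdx expects
  top_n_predictions.foldl (fun out preds =>
    out ++ [(PySem.List.enumerate preds).foldl
      (fun np ip => if none_idx.contains ip.1 then np ++ [(none : Option String)] else np ++ [ip.2]) []]) []

-- ===== PORT B =====
def make_none_of_empty_expects_alt (top_n_predictions : List (List (Option String))) (expects : List (Option String)) : List (List (Option String)) :=
  let mask := PySem.List.slice expects none (some (-1))
  let k : Int := mask.length
  top_n_predictions.map (fun preds =>
    (preds.zip mask).map (fun pe => if pe.2 == none then (none : Option String) else pe.1)
      ++ PySem.List.slice preds (some k) none)

-- ===== PRECONDITION & SPEC =====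
def Spec_make_none_of_empty_expects (top_n_predictions : List (List (Option String))) (expects : List (Option String)) (out : List (List (Option String))) : Prop := out = make_none_of_empty_expects_alt top_n_predictions expects
instance (top_n_predictions : List (List (Option String))) (expects : List (Option String)) (out : List (List (Option String))) : Decidable (Spec_make_none_of_empty_expects top_n_predictions expects out) := by unfold Spec_make_none_of_empty_expects; infer_instance

-- ===== CLAIM (what is proved, stated in full; the proofs are below) =====
def Claim_equal_make_none_of_empty_expects : Prop := ∀ (top_n_predictions : List (List (Option String))) (expects : List (Option String)), Dom_make_none_of_empty_expects top_n_predictions expects → Spec_make_none_of_empty_expects top_n_predictions expects (make_none_of_empty_expects top_n_predictions expects)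

-- ===== LEMMAS AND PROOFS =====

-- A's inner loop is the map of its body over enumerate
theorem pvA_inner_eq_map (idxs : List Int) (preds : List (Option String)) :
    (PySem.List.enumerate preds).foldl
      (fun np ip => if idxs.contains ip.1 then np ++ [(none : Option String)] else np ++ [ip.2]) []
    = (PySem.List.enumerate preds).map
        (fun ip => if idxs.contains ip.1 then (none : Option String) else ip.2) := by
  have hstep : (fun (np : List (Option String)) (ip : Int × Option String) =>
      if idxs.contains ip.1 then np ++ [(none : Option String)] else np ++ [ip.2])
      = fun np ip => np ++ [if idxs.contains ip.1 then (none : Option String) else ip.2] := by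
    funext np ip
    by_cases h : ip.1 ∈ idxs <;> simp [h]
  rw [hstep]
  simpa using PySem.List.foldl_append_singleton_eq_map
    (fun ip : Int × Option String => if idxs.contains ip.1 then (none : Option String) else ip.2)
    (PySem.List.enumerate preds) []

-- membership in the none_idx collection loop
theorem pv_collect_mem (xs : List (Option String)) (k : Int) (acc : List Int) (a : Int) :
    a ∈ (PySem.List.enumerate xs k).foldl
        (fun acc ie => if ie.2 == (none : Option String) then acc ++ [ie.1] else acc) acc
    ↔ a ∈ acc ∨ ∃ j : Nat, ∃ h : j < xs.length, xs[j] = none ∧ a = k + j := by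
  induction xs generalizing k acc with
  | nil => simp [PySem.List.enumerate]
  | cons x xs ih =>
    rw [show PySem.List.enumerate (x :: xs) k = (k, x) :: PySem.List.enumerate xs (k + 1) from by
      simp [PySem.List.enumerate]]
    simp only [List.foldl_cons]
    rw [ih]
    constructor
    · rintro (hmem | ⟨j, hj, hx, rfl⟩)
      · by_cases hx : x == (none : Option String)
        · rw [if_pos hx] at hmem
          rcases List.mem_append.mp hmem with h | h
          · exact Or.inl h
          · refine Or.inr ⟨0, by simp, by simpa using hx, by simpa using h⟩
        · rw [if_neg hx] at hmem; exact Or.inl hmem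
      · exact Or.inr ⟨j + 1, by simpa using hj, by simpa using hx, by push_cast; ring⟩
    · rintro (hmem | ⟨j, hj, hx, rfl⟩)
      · left
        by_cases hx : x == (none : Option String)
        · rw [if_pos hx]; exact List.mem_append.mpr (Or.inl hmem)
        · rw [if_neg hx]; exact hmem
      · cases j with
        | zero =>
          left
          rw [if_pos (by simpa using hx)]
          simp
        | succ j =>
          exact Or.inr ⟨j, by simpa using hj, by simpa using hx, by push_cast; ring⟩

-- characterisation of none_idx membership at a natural index
theorem pvNoneIdx_mem (expects : List (Option String)) (j : Nat) :
    ((j : Int) ∈ pvNoneIdx expects)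
      ↔ (PySem.List.slice expects none (some (-1)))[j]? = some none := by
  unfold pvNoneIdx
  rw [pv_collect_mem]
  set L := PySem.List.slice expects none (some (-1)) with hL
  constructor
  · rintro (h | ⟨j', hj', hx, hji⟩)
    · simp at h
    · have : j = j' := by omega
      subst this
      simp [List.getElem?_eq_getElem hj', hx]
  · intro h
    have hj : j < L.length := by
      by_contra hc
      rw [List.getElem?_eq_none (by omega)] at h
      simp at h
    refine Or.inr ⟨j, hj, ?_, by simp⟩
    rw [List.getElem?_eq_getElem hj] at h
    simpa using h

-- B's row, pointwise
theorem pvB_row_get (preds mask : List (Option String)) (j : Nat) (hj : j < preds.length)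
    (hj' : j < ((preds.zip mask).map (fun pe => if pe.2 == none then (none : Option String) else pe.1)
      ++ PySem.List.slice preds (some (mask.length : Int)) none).length) :
    ((preds.zip mask).map (fun pe => if pe.2 == none then (none : Option String) else pe.1)
      ++ PySem.List.slice preds (some (mask.length : Int)) none)[j]
    = if mask[j]? = some none then none else preds[j] := by
  simp only [PySem.List.slice_from_natCast] at hj' ⊢
  by_cases hlt : j < min preds.length mask.length
  · have hz : j < (preds.zip mask).length := by simpa using hlt
    have hm : j < mask.length := by omega
    rw [List.getElem_append_left (by simpa using hlt)]
    rw [List.getElem_map, List.getElem_zip]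
    rw [List.getElem?_eq_getElem hm]
    by_cases hx : mask[j] = none <;> simp [hx]
  · have hk : mask.length ≤ j := by omega
    have hlen : ((preds.zip mask).map (fun pe => if pe.2 == none then (none : Option String) else pe.1)).length
        = min preds.length mask.length := by simp
    rw [List.getElem_append_right (by omega)]
    have hmin : min preds.length mask.length = mask.length := by omega
    rw [List.getElem?_eq_none hk]
    simp only [hlen, hmin, List.getElem_drop]
    have : mask.length + (j - mask.length) = j := by omega
    simp [this]

-- B's row has the same length as the predictions row
theorem pvB_row_len (preds mask : List (Option String)) :
    ((preds.zip mask).map (fun pe => if pe.2 == none then (none : Option String) else pe.1)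
      ++ PySem.List.slice preds (some (mask.length : Int)) none).length = preds.length := by
  rw [PySem.List.slice_from_natCast]
  simp
  omega

-- A's outer loop is a map
theorem pvA_outer (tps : List (List (Option String))) (g : List (Option String) → List (Option String)) :
    tps.foldl (fun out preds => out ++ [g preds]) [] = tps.map g := by
  simpa using PySem.List.foldl_append_singleton_eq_map g tps []

-- the two rows agree
theorem pv_row_eq (expects : List (Option String)) (preds : List (Option String)) :
    (PySem.List.enumerate preds).foldl
      (fun np ip => if (pvNoneIdx expects).contains ip.1 then np ++ [(none : Option String)] else np ++ [ip.2]) []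
    = (preds.zip (PySem.List.slice expects none (some (-1)))).map
        (fun pe => if pe.2 == none then (none : Option String) else pe.1)
      ++ PySem.List.slice preds (some ((PySem.List.slice expects none (some (-1))).length : Int)) none := by
  rw [pvA_inner_eq_map]
  set mask := PySem.List.slice expects none (some (-1)) with hmask
  apply List.ext_getElem
  · rw [List.length_map, PySem.List.length_enumerate, pvB_row_len]
  · intro j hjl hjr
    have hj : j < preds.length := by
      rw [List.length_map, PySem.List.length_enumerate] at hjl; exact hjl
    rw [List.getElem_map, PySem.List.getElem_enumerate, pvB_row_get preds mask j hj hjr]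
    have := pvNoneIdx_mem expects j
    rw [← hmask] at this
    by_cases hmem : (j : Int) ∈ pvNoneIdx expects
    · simp [List.contains_eq_mem, hmem, this.mp hmem]
    · have hne : ¬ mask[j]? = some none := fun h => hmem (this.mpr h)
      simp [List.contains_eq_mem, hmem, hne]

-- ===== VERDICT (by name: the statement is the Claim_ definition above) =====
theorem make_none_of_empty_expects_spec : Claim_equal_make_none_of_empty_expects := by
  intro tps expects _
  unfold Spec_make_none_of_empty_expects make_none_of_empty_expects make_none_of_empty_expects_alt
  rw [pvA_outer]
  exact List.map_congr_left (fun preds _ => pv_row_eq expects preds)
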